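-- pv_equiv track=rewrite | github.com/rap2montemayor/Programming-Problems | CF/1343/C.py | getNegativeSegments
-- ===== SOURCE A (Python) =====
-- def getNegativeSegments(a):
--     negSegments = set()
--     start, end = 0, 0
--     insegment = False
--     for i in range(len(a)):
--         if a[i] < 0 and insegment == False:
--             insegment = True
--             start = i
--         if a[i] > 0  and insegment == True:
--             insegment = False
--             end = i
--             negSegments.add((start,end))
--     if insegment == True:
--         negSegments.add((start,len(a)))
--
--     return negSegments
-- ===== SOURCE B (Python) =====
-- def getNegativeSegments(a):
--     n = len(a)
--     res = set()
--     cuts = [i for i in range(n) if a[i] > 0] + [n]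
--     lo = 0
--     for b in cuts:
--         s = next((j for j in range(lo, b) if a[j] < 0), None)
--         if s is not None:
--             res.add((s, b))
--         lo = b + 1
--     return res
-- ===== Notes on version B (the rewrite author's own statement) =====
-- stated objective: alternative
-- what changed: Replaces A's single flag-driven scan (insegment state machine) by a two-phase form: first collect the cut points (indices of positive elements, plus len(a)), then for each chunk between consecutive cuts emit (first negative index in the chunk, cut) if the chunk contains a negative.
import Mathlib
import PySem

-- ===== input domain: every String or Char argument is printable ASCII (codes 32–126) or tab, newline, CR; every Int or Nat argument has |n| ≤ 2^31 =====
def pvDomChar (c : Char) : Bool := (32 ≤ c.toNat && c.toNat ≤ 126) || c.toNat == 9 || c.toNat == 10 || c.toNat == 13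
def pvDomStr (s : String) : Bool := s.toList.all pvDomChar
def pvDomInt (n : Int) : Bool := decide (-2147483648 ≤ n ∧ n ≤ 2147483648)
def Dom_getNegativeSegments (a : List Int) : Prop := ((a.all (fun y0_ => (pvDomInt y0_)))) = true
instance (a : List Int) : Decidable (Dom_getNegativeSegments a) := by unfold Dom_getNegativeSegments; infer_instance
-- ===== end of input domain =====

-- B replaces A's single flag-driven scan by a two-phase form: cut the index range at the
-- positive positions, then report the first negative of each chunk (objective: alternative).

-- ===== PORT A =====
-- literal transliteration of A: one pass over range(len(a)) with (segs, start, end, insegment) state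
def getNegativeSegments (a : List Int) : List (Int × Int) :=
  let st := (PySem.List.pyRange 0 (a.length : Int) 1).foldl
    (fun (st : PySem.Set (Int × Int) × Int × Int × Bool) (i : Int) =>
      let p := if PySem.List.pyGetD a i 0 < 0 ∧ st.2.2.2 = false then (true, i) else (st.2.2.2, st.2.1)
      if PySem.List.pyGetD a i 0 > 0 ∧ p.1 = true then
        (PySem.Set.add st.1 (p.2, i), p.2, i, false)
      else (st.1, p.2, st.2.2.1, p.1))
    (PySem.Set.empty, 0, 0, false)
  if st.2.2.2 = true then PySem.Set.add st.1 (st.2.1, (a.length : Int)) else st.1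

-- ===== PORT B =====
-- literal transliteration of B: cuts = positive indices ++ [n]; per cut, first negative since lo
def getNegativeSegments_alt (a : List Int) : List (Int × Int) :=
  let n : Int := (a.length : Int)
  let cuts := (PySem.List.pyRange 0 n 1).filter (fun i => decide (PySem.List.pyGetD a i 0 > 0)) ++ [n]
  let st := cuts.foldl
    (fun (st : PySem.Set (Int × Int) × Int) (b : Int) =>
      match (PySem.List.pyRange st.2 b 1).find? (fun j => decide (PySem.List.pyGetD a j 0 < 0)) with
      | some s => (PySem.Set.add st.1 (s, b), b + 1)
      | none => (st.1, b + 1))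
    (PySem.Set.empty, 0)
  st.1

-- ===== PRECONDITION & SPEC =====
def Spec_getNegativeSegments (a : List Int) (out : List (Int × Int)) : Prop := out = getNegativeSegments_alt a
instance (a : List Int) (out : List (Int × Int)) : Decidable (Spec_getNegativeSegments a out) := by unfold Spec_getNegativeSegments; infer_instance

-- ===== CLAIM (what is proved, stated in full; the proofs are below) =====
def Claim_equal_getNegativeSegments : Prop := ∀ (a : List Int), Dom_getNegativeSegments a → Spec_getNegativeSegments a (getNegativeSegments a)

-- ===== LEMMAS AND PROOFS =====

-- the common index-based specification: scan indices upward; st = none (outside a segment)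
-- or some s (inside a segment opened at s)
def specIdx (a : List Int) (k : Int) (st : Option Int) : List (Int × Int) :=
  if _h : k < (a.length : Int) then
    match st with
    | none => if PySem.List.pyGetD a k 0 < 0 then specIdx a (k+1) (some k) else specIdx a (k+1) none
    | some s => if PySem.List.pyGetD a k 0 > 0 then (s, k) :: specIdx a (k+1) none else specIdx a (k+1) (some s)
  else match st with
    | none => []
    | some s => [(s, (a.length : Int))]
termination_by ((a.length : Int) - k).toNat
decreasing_by all_goals omega

def stepA (a : List Int) (st : PySem.Set (Int × Int) × Int × Int × Bool) (i : Int) :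
    PySem.Set (Int × Int) × Int × Int × Bool :=
  let p := if PySem.List.pyGetD a i 0 < 0 ∧ st.2.2.2 = false then (true, i) else (st.2.2.2, st.2.1)
  if PySem.List.pyGetD a i 0 > 0 ∧ p.1 = true then
    (PySem.Set.add st.1 (p.2, i), p.2, i, false)
  else (st.1, p.2, st.2.2.1, p.1)

def stepB (a : List Int) (st : PySem.Set (Int × Int) × Int) (b : Int) : PySem.Set (Int × Int) × Int :=
  match (PySem.List.pyRange st.2 b 1).find? (fun j => decide (PySem.List.pyGetD a j 0 < 0)) with
  | some s => (PySem.Set.add st.1 (s, b), b + 1)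
  | none => (st.1, b + 1)

lemma portA_eq (a : List Int) :
    getNegativeSegments a =
      (let st := (PySem.List.pyRange 0 (a.length : Int) 1).foldl (stepA a) (PySem.Set.empty, 0, 0, false)
       if st.2.2.2 = true then PySem.Set.add st.1 (st.2.1, (a.length : Int)) else st.1) := rfl

lemma portB_eq (a : List Int) :
    getNegativeSegments_alt a =
      (((PySem.List.pyRange 0 (a.length : Int) 1).filter
          (fun i => decide (PySem.List.pyGetD a i 0 > 0)) ++ [(a.length : Int)]).foldl
        (stepB a) (PySem.Set.empty, 0)).1 := rfl

lemma find?_pyRange_none (p : Int → Bool) (lo b : Int)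
    (h : ∀ j : Int, lo ≤ j → j < b → ¬ p j = true) :
    (PySem.List.pyRange lo b 1).find? p = none := by
  rw [List.find?_eq_none]
  intro x hx
  rw [PySem.List.mem_pyRange_one] at hx
  exact h x hx.1 hx.2

lemma find?_pyRange_some (p : Int → Bool) (lo s b : Int) (hlos : lo ≤ s) (hsb : s < b)
    (hs : p s = true) (h : ∀ j : Int, lo ≤ j → j < s → ¬ p j = true) :
    (PySem.List.pyRange lo b 1).find? p = some s := by
  rw [PySem.List.pyRange_one_append lo s b hlos (le_of_lt hsb), List.find?_append,
      find?_pyRange_none p lo s h, PySem.List.pyRange_one_cons hsb]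
  simp [hs]

-- invariant carried by B's fold state (r, lo) relative to scan position k and spec state st
def segInv (a : List Int) (lo k : Int) (st : Option Int) : Prop :=
  match st with
  | none => ∀ j : Int, lo ≤ j → j < k → PySem.List.pyGetD a j 0 = 0
  | some s => lo ≤ s ∧ s < k ∧ PySem.List.pyGetD a s 0 < 0 ∧
      (∀ j : Int, lo ≤ j → j < s → 0 ≤ PySem.List.pyGetD a j 0) ∧
      (∀ j : Int, lo ≤ j → j < k → PySem.List.pyGetD a j 0 ≤ 0)

lemma Amain (a : List Int) : ∀ (m : Nat) (k : Int) (r : PySem.Set (Int × Int)) (s e : Int) (b : Bool),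
    ((a.length : Int) - k).toNat ≤ m →
    (let st := (PySem.List.pyRange k (a.length : Int) 1).foldl (stepA a) (r, s, e, b)
     if st.2.2.2 = true then PySem.Set.add st.1 (st.2.1, (a.length : Int)) else st.1)
    = (specIdx a k (if b then some s else none)).foldl PySem.Set.add r := by
  intro m
  induction m with
  | zero =>
    intro k r s e b hm
    have hk : (a.length : Int) ≤ k := by omega
    rw [PySem.List.pyRange_one_eq_nil hk, specIdx.eq_def]
    rw [dif_neg (by omega)]
    cases b <;> simp [List.foldl]
  | succ m ih =>
    intro k r s e b hm
    by_cases hk : k < (a.length : Int)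
    · rw [PySem.List.pyRange_one_cons hk, List.foldl_cons, specIdx.eq_def, dif_pos hk]
      have hm' : ((a.length : Int) - (k+1)).toNat ≤ m := by omega
      by_cases hneg : PySem.List.pyGetD a k 0 < 0
      · by_cases hb : b
        · subst hb
          have : stepA a (r, s, e, true) k = (r, s, e, true) := by
            simp [stepA, hneg, show ¬ PySem.List.pyGetD a k 0 > 0 by omega]
          rw [this, ih (k+1) r s e true hm']
          simp [show ¬ PySem.List.pyGetD a k 0 > 0 by omega]
        · simp only [Bool.not_eq_true] at hb; subst hb
          have : stepA a (r, s, e, false) k = (r, k, e, true) := by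
            simp [stepA, hneg, show ¬ PySem.List.pyGetD a k 0 > 0 by omega]
          rw [this, ih (k+1) r k e true hm']
          simp [hneg]
      · by_cases hpos : PySem.List.pyGetD a k 0 > 0
        · by_cases hb : b
          · subst hb
            have : stepA a (r, s, e, true) k = (PySem.Set.add r (s, k), s, k, false) := by
              simp [stepA, hneg, hpos]
            rw [this, ih (k+1) (PySem.Set.add r (s, k)) s k false hm']
            simp [hpos, List.foldl_cons]
          · simp only [Bool.not_eq_true] at hb; subst hb
            have : stepA a (r, s, e, false) k = (r, s, e, false) := by
              simp [stepA, hneg, hpos]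
            rw [this, ih (k+1) r s e false hm']
            simp [hneg]
        · by_cases hb : b
          · subst hb
            have : stepA a (r, s, e, true) k = (r, s, e, true) := by
              simp [stepA, hneg, hpos]
            rw [this, ih (k+1) r s e true hm']
            simp [hpos]
          · simp only [Bool.not_eq_true] at hb; subst hb
            have : stepA a (r, s, e, false) k = (r, s, e, false) := by
              simp [stepA, hneg, hpos]
            rw [this, ih (k+1) r s e false hm']
            simp [hneg]
    · rw [PySem.List.pyRange_one_eq_nil (by omega), specIdx.eq_def, dif_neg hk]
      cases b <;> simp [List.foldl]

lemma Bend (a : List Int) (lo : Int) (r : PySem.Set (Int × Int)) (st : Option Int)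
    (_hlo : 0 ≤ lo) (_hlon : lo ≤ (a.length : Int)) (hinv : segInv a lo (a.length : Int) st) :
    (((PySem.List.pyRange (a.length : Int) (a.length : Int) 1).filter
        (fun i => decide (PySem.List.pyGetD a i 0 > 0)) ++ [(a.length : Int)]).foldl
      (stepB a) (r, lo)).1
    = (specIdx a (a.length : Int) st).foldl PySem.Set.add r := by
  rw [PySem.List.pyRange_one_eq_nil (le_refl _)]
  rw [specIdx.eq_def, dif_neg (lt_irrefl _)]
  match st with
  | none =>
    have hfind : (PySem.List.pyRange lo (a.length : Int) 1).find?
        (fun j => decide (PySem.List.pyGetD a j 0 < 0)) = none := by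
      apply find?_pyRange_none
      intro j hj1 hj2
      simp [hinv j hj1 hj2]
    simp [stepB, hfind]
  | some s =>
    obtain ⟨h1, h2, h3, h4, h5⟩ := hinv
    have hfind : (PySem.List.pyRange lo (a.length : Int) 1).find?
        (fun j => decide (PySem.List.pyGetD a j 0 < 0)) = some s := by
      apply find?_pyRange_some _ _ _ _ h1 h2 (by simp [h3])
      intro j hj1 hj2
      have := h4 j hj1 hj2
      simp; omega
    simp [stepB, hfind]

lemma Bmain (a : List Int) : ∀ (m : Nat) (k lo : Int) (r : PySem.Set (Int × Int)) (st : Option Int),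
    ((a.length : Int) - k).toNat ≤ m → 0 ≤ lo → lo ≤ k → k ≤ (a.length : Int) → segInv a lo k st →
    (((PySem.List.pyRange k (a.length : Int) 1).filter
        (fun i => decide (PySem.List.pyGetD a i 0 > 0)) ++ [(a.length : Int)]).foldl
      (stepB a) (r, lo)).1
    = (specIdx a k st).foldl PySem.Set.add r := by
  intro m
  induction m with
  | zero =>
    intro k lo r st hm hlo hlok hkn hinv
    have hk : k = (a.length : Int) := by omega
    subst hk
    exact Bend a lo r st hlo hlok hinv
  | succ m ih =>
    intro k lo r st hm hlo hlok hkn hinv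
    by_cases hk : k < (a.length : Int)
    · rw [PySem.List.pyRange_one_cons hk, List.filter_cons]
      have hm' : ((a.length : Int) - (k+1)).toNat ≤ m := by omega
      by_cases hpos : PySem.List.pyGetD a k 0 > 0
      · rw [if_pos (by simpa using hpos), List.cons_append, List.foldl_cons]
        match st with
        | none =>
          have hfind : (PySem.List.pyRange lo k 1).find?
              (fun j => decide (PySem.List.pyGetD a j 0 < 0)) = none := by
            apply find?_pyRange_none
            intro j hj1 hj2
            simp [hinv j hj1 hj2]
          rw [show stepB a (r, lo) k = (r, k + 1) by simp [stepB, hfind]]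
          rw [ih (k+1) (k+1) r none hm' (by omega) (le_refl _) (by omega)
                (by intro j hj1 hj2; omega)]
          conv_rhs => rw [specIdx.eq_def]
          simp [hk, show ¬ PySem.List.pyGetD a k 0 < 0 by omega]
        | some s =>
          obtain ⟨h1, h2, h3, h4, h5⟩ := hinv
          have hfind : (PySem.List.pyRange lo k 1).find?
              (fun j => decide (PySem.List.pyGetD a j 0 < 0)) = some s := by
            apply find?_pyRange_some _ _ _ _ h1 h2 (by simp [h3])
            intro j hj1 hj2
            have := h4 j hj1 hj2
            simp; omega
          rw [show stepB a (r, lo) k = (PySem.Set.add r (s, k), k + 1) by simp [stepB, hfind]]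
          rw [ih (k+1) (k+1) (PySem.Set.add r (s, k)) none hm' (by omega) (le_refl _) (by omega)
                (by intro j hj1 hj2; omega)]
          conv_rhs => rw [specIdx.eq_def]
          simp [hk, hpos, List.foldl_cons]
      · rw [if_neg (by simpa using hpos)]
        match st with
        | none =>
          by_cases hneg : PySem.List.pyGetD a k 0 < 0
          · rw [ih (k+1) lo r (some k) hm' hlo (by omega) (by omega)
                  ⟨hlok, by omega, hneg,
                   by intro j hj1 hj2; have := hinv j hj1 hj2; omega,
                   by intro j hj1 hj2
                      by_cases hjk : j < k
                      · have := hinv j hj1 hjk; omega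
                      · have : j = k := by omega
                        subst this; omega⟩]
            conv_rhs => rw [specIdx.eq_def]
            simp [hk, hneg]
          · rw [ih (k+1) lo r none hm' hlo (by omega) (by omega)
                  (by intro j hj1 hj2
                      by_cases hjk : j < k
                      · exact hinv j hj1 hjk
                      · have : j = k := by omega
                        subst this; omega)]
            conv_rhs => rw [specIdx.eq_def]
            simp [hk, hneg]
        | some s =>
          obtain ⟨h1, h2, h3, h4, h5⟩ := hinv
          rw [ih (k+1) lo r (some s) hm' hlo (by omega) (by omega)
                ⟨h1, by omega, h3, h4,
                 by intro j hj1 hj2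
                    by_cases hjk : j < k
                    · exact h5 j hj1 hjk
                    · have : j = k := by omega
                      subst this; omega⟩]
          conv_rhs => rw [specIdx.eq_def]
          simp [hk, hpos]
    · have hk' : k = (a.length : Int) := by omega
      subst hk'
      exact Bend a lo r st hlo hlok hinv

-- ===== VERDICT (by name: the statement is the Claim_ definition above) =====
theorem getNegativeSegments_spec : Claim_equal_getNegativeSegments := by
  intro a _
  unfold Spec_getNegativeSegments
  rw [portA_eq, portB_eq,
      Amain a ((a.length : Int) - 0).toNat 0 PySem.Set.empty 0 0 false (le_refl _),
      Bmain a ((a.length : Int) - 0).toNat 0 0 PySem.Set.empty none (le_refl _) (le_refl _)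
        (le_refl _) (by positivity) (by intro j h1 h2; omega)]
  simp
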